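-- pv_equiv track=rewrite | github.com/vgcarlol/gen | src/regex_functions.py | considerPeriod
-- ===== SOURCE A (Python) =====
-- def considerPeriod(r: str) -> str:
--     """
--     Reemplaza '.' por '\.' si no está escapado ya.
--     """
--     result = ''
--     i = 0
--     while i < len(r):
--         if r[i] == '\\':
--             # Preservar escape existente
--             if i + 1 < len(r):
--                 result += r[i] + r[i+1]
--                 i += 2
--             else:
--                 result += r[i]
--                 i += 1
--         elif r[i] == '.':
--             result += '\\.'
--             i += 1
--         else:
--             result += r[i]
--             i += 1
--     return result
-- ===== SOURCE B (Python) =====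
-- import re
--
-- def considerPeriod(r: str) -> str:
--     # Let the regex engine drive the scan: an existing escape pair (backslash +
--     # any non-newline char) is kept unchanged; a bare '.' becomes '\.'.
--     return re.sub(r'\\.|\.', lambda m: m.group(0) if len(m.group(0)) == 2 else '\\.', r)
-- ===== Notes on version B (the rewrite author's own statement) =====
-- stated objective: idiomatic
-- what changed: Replaced the manual index/cursor while-loop that builds the result with repeated string += by a single re.sub over the pattern r'\\.|\.' whose callback keeps existing two-char escape pairs and escapes bare dots; the regex engine drives the traversal and builds the output once.
import Mathlib
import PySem

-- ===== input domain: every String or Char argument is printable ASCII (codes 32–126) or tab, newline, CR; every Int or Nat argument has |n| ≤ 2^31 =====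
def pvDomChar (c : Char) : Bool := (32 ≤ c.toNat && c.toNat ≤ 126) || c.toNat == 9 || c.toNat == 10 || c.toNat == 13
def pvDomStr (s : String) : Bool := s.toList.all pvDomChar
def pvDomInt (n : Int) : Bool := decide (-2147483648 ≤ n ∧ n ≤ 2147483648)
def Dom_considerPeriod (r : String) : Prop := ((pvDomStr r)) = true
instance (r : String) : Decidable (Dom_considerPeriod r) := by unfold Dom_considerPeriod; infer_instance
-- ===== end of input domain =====

-- B escapes unescaped dots via one regex substitution instead of A's manual cursor loop (idiomatic; same result).

-- ===== PORT A =====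
-- A's while-loop over index i, transcribed as recursion on the remaining suffix
-- (r[i] = head, r[i+1] = second element), with the accumulated `result`.
def pvALoop : List Char → List Char → List Char
  | [], res => res
  | c :: rest, res =>
    if c = '\\' then
      match rest with
      | d :: rest2 => pvALoop rest2 (res ++ [c, d])   -- preserve existing escape, i += 2
      | [] => pvALoop [] (res ++ [c])                 -- trailing lone backslash, i += 1
    else if c = '.' then pvALoop rest (res ++ ['\\', '.'])
    else pvALoop rest (res ++ [c])

def considerPeriod (r : String) : String := String.ofList (pvALoop r.toList [])

-- ===== PORT B =====
-- Hand port of re.sub(r'\\.|\.', cb, r): at each position the engine first tries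
-- '\\.' (backslash + any char EXCEPT newline, since '.' does not match '\n'),
-- then a literal '.'; on a match the callback's value is emitted and the match
-- consumed, otherwise one char is copied. Exact for this pattern on this domain.
def pvBSub (cs : List Char) : List Char :=
  match cs with
  | [] => []
  | c :: rest =>
    if c = '\\' then
      match rest with
      | d :: rest2 =>
        if d = '\n' then c :: pvBSub (d :: rest2)             -- '\\.' fails ('.' ≠ '\n'), '\.' fails: copy one char
        else c :: d :: pvBSub rest2                   -- escape pair matched, callback returns it unchanged
      | [] => c :: pvBSub []                          -- no match at end: copy the lone backslash
    else if c = '.' then '\\' :: '.' :: pvBSub rest   -- bare dot matched, callback returns '\.'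
    else c :: pvBSub rest
termination_by cs.length

def considerPeriod_alt (r : String) : String := String.ofList (pvBSub r.toList)

-- ===== PRECONDITION & SPEC =====
def Spec_considerPeriod (r : String) (out : String) : Prop := out = considerPeriod_alt r
instance (r : String) (out : String) : Decidable (Spec_considerPeriod r out) := by unfold Spec_considerPeriod; infer_instance

-- ===== CLAIM (what is proved, stated in full; the proofs are below) =====
def Claim_equal_considerPeriod : Prop := ∀ (r : String), Dom_considerPeriod r → Spec_considerPeriod r (considerPeriod r)

-- ===== LEMMAS AND PROOFS =====
lemma pvKey (n : Nat) : ∀ cs : List Char, cs.length ≤ n → ∀ res, pvALoop cs res = res ++ pvBSub cs := by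
  induction n with
  | zero =>
    intro cs h res
    cases cs with
    | nil => rw [pvALoop.eq_def, pvBSub.eq_def]; simp
    | cons c rest => simp at h
  | succ n ih =>
    intro cs h res
    cases cs with
    | nil => rw [pvALoop.eq_def, pvBSub.eq_def]; simp
    | cons c rest =>
      by_cases hc : c = '\\'
      · cases rest with
        | nil =>
          rw [show pvALoop [c] res = pvALoop [] (res ++ [c]) from by rw [pvALoop.eq_def]; simp [hc]]
          rw [show pvALoop ([] : List Char) (res ++ [c]) = res ++ [c] from by rw [pvALoop.eq_def]]
          rw [show pvBSub [c] = [c] from by rw [pvBSub.eq_def, pvBSub.eq_def]; simp [hc]]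
        | cons d rest2 =>
          have h2 : rest2.length ≤ n := by simp at h; omega
          rw [show pvALoop (c::d::rest2) res = pvALoop rest2 (res ++ [c, d]) from by
              rw [pvALoop.eq_def]; simp [hc]]
          rw [ih rest2 h2]
          by_cases hd : d = '\n'
          · rw [show pvBSub (c::d::rest2) = c :: pvBSub (d::rest2) from by
                rw [pvBSub.eq_def]; simp [hc, hd]]
            rw [show pvBSub (d::rest2) = d :: pvBSub rest2 from by
                have h1 : ¬ d = '\\' := by rw [hd]; decide
                have h3 : ¬ d = '.' := by rw [hd]; decide
                rw [pvBSub.eq_def]; simp [h1, h3]]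
            first | rfl | simp
          · rw [show pvBSub (c::d::rest2) = c :: d :: pvBSub rest2 from by
                rw [pvBSub.eq_def]; simp [hc, hd]]
            first | rfl | simp
      · have h2 : rest.length ≤ n := by simp at h; omega
        by_cases hp : c = '.'
        · rw [show pvALoop (c::rest) res = pvALoop rest (res ++ ['\\', '.']) from by
              rw [pvALoop.eq_def]; simp [hp]]
          rw [ih rest h2]
          rw [show pvBSub (c::rest) = '\\' :: '.' :: pvBSub rest from by
              rw [pvBSub.eq_def]; simp [hp]]
          first | rfl | simp
        · rw [show pvALoop (c::rest) res = pvALoop rest (res ++ [c]) from by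
              rw [pvALoop.eq_def]; simp [hc, hp]]
          rw [ih rest h2]
          rw [show pvBSub (c::rest) = c :: pvBSub rest from by
              rw [pvBSub.eq_def]; simp [hc, hp]]
          first | rfl | simp

lemma pvALoop_eq_append_pvBSub (cs : List Char) (res : List Char) :
    pvALoop cs res = res ++ pvBSub cs :=
  pvKey cs.length cs (Nat.le_refl _) res

-- ===== VERDICT (by name: the statement is the Claim_ definition above) =====
theorem considerPeriod_spec : Claim_equal_considerPeriod := by
  intro r _
  unfold Spec_considerPeriod considerPeriod considerPeriod_alt
  rw [pvALoop_eq_append_pvBSub, List.nil_append]
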